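-- pv_equiv track=rewrite | github.com/NicolasPiron/crossmodal-sequences | sequences/stimuli_manager.py | check_transitions
-- ===== SOURCE A (Python) =====
-- from typing import Dict, List, Tuple
--
-- def count_dupes(arr:List)-> int:
--     '''Count the number of duplicates in a list'''
--     seen = set()
--     duplicate_counter = 0
--     for item in arr:
--         if item in seen:
--             duplicate_counter += 1
--         else:
--             seen.add(item)
--     return duplicate_counter
--
-- def check_transitions(order1: str, order2: str):
--     ''' Check if the transitions between two sequences are unique'''
--     if order1 == order2:
--         return False
--     transitions = []
--     for order in (order1, order2):
--         order = ''.join(order)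
--         for i in range(len(order)-1):
--             transitions.append(order[i:i+2])
--     if count_dupes(transitions) > 0:
--         return False
--     return True
-- ===== SOURCE B (Python) =====
-- def check_transitions(order1: str, order2: str):
--     ''' Check if the transitions between two sequences are unique'''
--     if order1 == order2:
--         return False
--     bigrams = [s[i:i+2] for s in (order1, order2) for i in range(len(s)-1)]
--     bigrams.sort()
--     return all(x != y for x, y in zip(bigrams, bigrams[1:]))
-- ===== Notes on version B (the rewrite author's own statement) =====
-- stated objective: alternative
-- what changed: Duplicate detection by seen-set counting is replaced by sort-then-adjacent-compare: collect all bigrams in one comprehension, sort them, and scan once comparing each entry to its predecessor.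
import Mathlib
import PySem

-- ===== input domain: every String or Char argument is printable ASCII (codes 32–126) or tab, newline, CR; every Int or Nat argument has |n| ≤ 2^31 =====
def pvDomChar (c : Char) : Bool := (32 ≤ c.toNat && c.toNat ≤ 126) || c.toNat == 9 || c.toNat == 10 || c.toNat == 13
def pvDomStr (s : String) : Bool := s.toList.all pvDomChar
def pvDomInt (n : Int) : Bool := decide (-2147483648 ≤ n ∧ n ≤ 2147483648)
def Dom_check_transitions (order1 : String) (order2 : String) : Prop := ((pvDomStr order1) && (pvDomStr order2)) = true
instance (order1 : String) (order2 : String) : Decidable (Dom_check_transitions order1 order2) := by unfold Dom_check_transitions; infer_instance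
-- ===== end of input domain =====

-- B replaces the seen-set duplicate counter by sort-then-adjacent-compare (alternative decomposition, not faster).

-- ===== PORT A =====
-- the loop body of count_dupes: state = (seen, duplicate_counter)
def cdStep (st : PySem.Set (List Char) × Int) (item : List Char) : PySem.Set (List Char) × Int :=
  if PySem.Set.contains st.1 item then (st.1, st.2 + 1)
  else (PySem.Set.add st.1 item, st.2)

def count_dupes (arr : List (List Char)) : Int :=
  (arr.foldl cdStep (PySem.Set.empty, 0)).2

def check_transitions (order1 : String) (order2 : String) : Bool :=
  if order1 == order2 then false
  else
    -- ''.join(order) is the identity on a str; the nested loops append each slice order[i:i+2]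
    let transitions : List (List Char) :=
      [order1.toList, order2.toList].foldl
        (fun acc order =>
          (PySem.List.pyRange 0 ((order.length : Int) - 1) 1).foldl
            (fun acc2 i => acc2 ++ [PySem.List.slice order (some i) (some (i + 2))]) acc)
        []
    if count_dupes transitions > 0 then false else true

-- ===== PORT B =====
-- the bigram comprehension for one of the two strings
def bigrams (s : List Char) : List (List Char) :=
  (PySem.List.pyRange 0 ((s.length : Int) - 1) 1).map
    (fun i => PySem.List.slice s (some i) (some (i + 2)))

def check_transitions_alt (order1 : String) (order2 : String) : Bool :=
  if order1 == order2 then false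
  else
    -- the Decidable-LT instance is given explicitly so the order lemmas about sorted apply verbatim
    let bs := @PySem.List.sorted (List Char) (List Char) _ LinearOrder.toDecidableLT
      (bigrams order1.toList ++ bigrams order2.toList) (fun x => x) false
    (bs.zip bs.tail).all (fun p => !(p.1 == p.2))

-- ===== PRECONDITION & SPEC =====
def Spec_check_transitions (order1 : String) (order2 : String) (out : Bool) : Prop := out = check_transitions_alt order1 order2
instance (order1 : String) (order2 : String) (out : Bool) : Decidable (Spec_check_transitions order1 order2 out) := by unfold Spec_check_transitions; infer_instance

-- ===== CLAIM (what is proved, stated in full; the proofs are below) =====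
def Claim_equal_check_transitions : Prop := ∀ (order1 : String) (order2 : String), Dom_check_transitions order1 order2 → Spec_check_transitions order1 order2 (check_transitions order1 order2)

-- ===== LEMMAS AND PROOFS =====

-- the counter never decreases along the fold
theorem cd_mono : ∀ (arr : List (List Char)) (seen : PySem.Set (List Char)) (c : Int),
    c ≤ (arr.foldl cdStep (seen, c)).2 := by
  intro arr
  induction arr with
  | nil => intro seen c; simp
  | cons a t ih =>
    intro seen c
    simp only [List.foldl_cons, cdStep]
    split
    · exact le_trans (by omega) (ih seen (c + 1))
    · exact ih _ c

-- the counter stays put iff no element is seen twice and none is already in seen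
theorem cd_zero_iff : ∀ (arr : List (List Char)) (seen : PySem.Set (List Char)) (c : Int),
    (arr.foldl cdStep (seen, c)).2 = c ↔ (arr.Nodup ∧ ∀ x ∈ arr, x ∉ seen) := by
  intro arr
  induction arr with
  | nil => intro seen c; simp
  | cons a t ih =>
    intro seen c
    simp only [List.foldl_cons, cdStep]
    by_cases hmem : a ∈ seen
    · have hc : PySem.Set.contains seen a = true := by simpa using hmem
      rw [if_pos hc]
      have := cd_mono t seen (c + 1)
      constructor
      · intro h; omega
      · rintro ⟨-, hall⟩; exact absurd hmem (hall a (by simp))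
    · have hc : ¬ PySem.Set.contains seen a = true := by simpa using hmem
      rw [if_neg hc]
      rw [ih (PySem.Set.add seen a) c]
      constructor
      · rintro ⟨hnd, hall⟩
        refine ⟨List.nodup_cons.mpr ⟨fun ha => ?_, hnd⟩, ?_⟩
        · exact (hall a ha) (by simp [PySem.Set.mem_add])
        · intro x hx
          rcases List.mem_cons.mp hx with rfl | hx'
          · exact hmem
          · intro hxs
            exact (hall x hx') (by simp [PySem.Set.mem_add, hxs])
      · rintro ⟨hnd, hall⟩
        obtain ⟨hna, hnd'⟩ := List.nodup_cons.mp hnd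
        refine ⟨hnd', fun x hx hxadd => ?_⟩
        rcases (PySem.Set.mem_add _ _ _).mp hxadd with hxs | rfl
        · exact (hall x (by simp [hx])) hxs
        · exact hna hx

theorem count_dupes_eq_zero_iff (arr : List (List Char)) :
    count_dupes arr = 0 ↔ arr.Nodup := by
  unfold count_dupes
  rw [cd_zero_iff arr PySem.Set.empty 0]
  simp [PySem.Set.empty]

theorem count_dupes_nonneg (arr : List (List Char)) : 0 ≤ count_dupes arr :=
  cd_mono arr PySem.Set.empty 0

-- appending singletons along a fold is map
theorem foldl_append_map {α β : Type} (f : α → β) :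
    ∀ (l : List α) (acc : List β), l.foldl (fun a i => a ++ [f i]) acc = acc ++ l.map f := by
  intro l
  induction l with
  | nil => simp
  | cons a t ih => intro acc; simp [ih]

-- A's nested appending loops build exactly B's two bigram comprehensions
theorem transitions_eq (o1 o2 : List Char) :
    ([o1, o2].foldl
      (fun acc order =>
        (PySem.List.pyRange 0 ((order.length : Int) - 1) 1).foldl
          (fun acc2 i => acc2 ++ [PySem.List.slice order (some i) (some (i + 2))]) acc)
      []) = bigrams o1 ++ bigrams o2 := by
  simp only [List.foldl_cons, List.foldl_nil, foldl_append_map]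
  simp [bigrams]

-- on a ≤-sorted list, adjacent distinctness is Nodup
theorem adj_nodup {α : Type} [LinearOrder α] [BEq α] [LawfulBEq α] :
    ∀ (l : List α), l.Pairwise (fun a b => a ≤ b) →
    (((l.zip l.tail).all (fun p => !(p.1 == p.2))) = true ↔ l.Nodup) := by
  intro l
  induction l with
  | nil => intro _; simp
  | cons a t ih =>
    intro h
    cases t with
    | nil => simp
    | cons b t =>
      obtain ⟨ha, ht⟩ := List.pairwise_cons.mp h
      have hab : a ≤ b := ha b (by simp)
      have iht := ih ht
      simp only [List.tail_cons, List.zip_cons_cons, List.all_cons, Bool.and_eq_true] at iht ⊢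
      rw [iht]
      constructor
      · rintro ⟨hne, hnd⟩
        have hab' : a ≠ b := by simpa using hne
        refine List.nodup_cons.mpr ⟨fun hmem => ?_, hnd⟩
        rcases List.mem_cons.mp hmem with rfl | hx
        · exact hab' rfl
        · have hba : b ≤ a := (List.pairwise_cons.mp ht).1 a hx
          exact hab' (le_antisymm hab hba)
      · intro hnd
        obtain ⟨hna, hnd'⟩ := List.nodup_cons.mp hnd
        exact ⟨by simpa using fun h' : a = b => hna (h' ▸ List.mem_cons_self ..), hnd'⟩

-- ===== VERDICT (by name: the statement is the Claim_ definition above) =====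
theorem check_transitions_spec : Claim_equal_check_transitions := by
  intro o1 o2 _
  unfold Spec_check_transitions check_transitions check_transitions_alt
  by_cases heq : (o1 == o2) = true
  · simp [heq]
  · simp only [if_neg heq]
    rw [transitions_eq o1.toList o2.toList]
    generalize bigrams o1.toList ++ bigrams o2.toList = T
    have hsp := PySem.List.sorted_pairwise T (fun x : List Char => x)
    have hperm := @PySem.List.sorted_perm (List Char) (List Char) _ LinearOrder.toDecidableLT T (fun x => x) false
    have hB := adj_nodup _ hsp
    rw [hperm.nodup_iff] at hB
    have h0 := count_dupes_nonneg T
    have h1 := count_dupes_eq_zero_iff T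
    rw [Bool.eq_iff_iff, hB]
    split_ifs with hgt
    · constructor
      · intro h; cases h
      · intro h; rw [← h1] at h; omega
    · constructor
      · intro _; rw [← h1]; omega
      · intro _; rfl
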